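-- pv_equiv track=rewrite | github.com/LYOKOIIIYYR/GoGo | primerMakerUIversion.py | is_DNA_seq
-- ===== SOURCE A (Python) =====
-- def is_DNA_seq(seq):
--     define = []
--     DNA_seq = ['A', 'T', 'C', 'G']
--     for bp in seq:
--         if bp in DNA_seq:
--             define.append(True)
--         else:
--             define.append(False)
--     return all(define)
-- ===== SOURCE B (Python) =====
-- def is_DNA_seq(seq):
--     # A sequence is DNA iff every position is accounted for by one of the four
--     # base counts: no per-character membership test, just counting + arithmetic.
--     return len(seq) == seq.count('A') + seq.count('T') + seq.count('C') + seq.count('G')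
-- ===== Notes on version B (the rewrite author's own statement) =====
-- stated objective: alternative
-- what changed: Replaces the per-character membership loop building a boolean list (then all()) with an arithmetic identity: the string is valid DNA iff the counts of 'A','T','C','G' sum to its length, computed by four library counting passes and one comparison.
import Mathlib
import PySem

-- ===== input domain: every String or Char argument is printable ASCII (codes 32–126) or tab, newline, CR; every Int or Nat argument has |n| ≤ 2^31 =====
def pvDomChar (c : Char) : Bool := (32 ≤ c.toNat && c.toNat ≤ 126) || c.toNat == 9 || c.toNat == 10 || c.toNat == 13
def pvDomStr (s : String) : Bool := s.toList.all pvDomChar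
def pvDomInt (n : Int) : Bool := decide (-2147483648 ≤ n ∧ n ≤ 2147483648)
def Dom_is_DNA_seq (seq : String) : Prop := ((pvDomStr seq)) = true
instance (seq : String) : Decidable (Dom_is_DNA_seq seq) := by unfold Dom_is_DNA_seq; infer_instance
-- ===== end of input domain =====

-- ===== PORT A =====
-- B replaces the membership loop + boolean-list + all() with a counting identity (alternative).
def is_DNA_seq (seq : String) : Bool :=
  let DNA_seq : List Char := ['A', 'T', 'C', 'G']
  let define : List Bool :=
    seq.toList.foldl (fun define bp =>
      if DNA_seq.contains bp then define ++ [true] else define ++ [false]) []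
  define.all id

-- ===== PORT B =====
def is_DNA_seq_alt (seq : String) : Bool :=
  PySem.Str.len seq ==
    PySem.Str.count seq "A" + PySem.Str.count seq "T" +
    PySem.Str.count seq "C" + PySem.Str.count seq "G"

-- ===== PRECONDITION & SPEC =====
def Spec_is_DNA_seq (seq : String) (out : Bool) : Prop := out = is_DNA_seq_alt seq
instance (seq : String) (out : Bool) : Decidable (Spec_is_DNA_seq seq out) := by unfold Spec_is_DNA_seq; infer_instance

-- ===== CLAIM (what is proved, stated in full; the proofs are below) =====
def Claim_equal_is_DNA_seq : Prop := ∀ (seq : String), Dom_is_DNA_seq seq → Spec_is_DNA_seq seq (is_DNA_seq seq)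

-- ===== LEMMAS AND PROOFS =====

-- A's loop: appending booleans then all() = every char is one of the four bases.
theorem foldl_append_all (l : List Char) (acc : List Bool) :
    (l.foldl (fun define bp =>
      if ['A', 'T', 'C', 'G'].contains bp then define ++ [true] else define ++ [false]) acc).all id
    = (acc.all id && l.all (fun bp => (['A', 'T', 'C', 'G'] : List Char).contains bp)) := by
  induction l generalizing acc with
  | nil => simp
  | cons c l ih =>
    cases h : (['A', 'T', 'C', 'G'] : List Char).contains c with
    | true =>
      simp only [List.foldl_cons, List.all_cons, h, if_true, ih, List.all_append]
      simp [Bool.and_comm]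
    | false =>
      simp only [List.foldl_cons, List.all_cons, h, Bool.false_eq_true, if_false, ih,
        List.all_append]
      simp

-- Python str.count with a single-character pattern is List.count.
theorem count_go_single (c : Char) (fuel : Nat) (l : List Char) (acc : Nat)
    (h : l.length ≤ fuel) :
    PySem.Chars.count.go [c] fuel l acc = acc + l.count c := by
  induction fuel generalizing l acc with
  | zero =>
    cases l with
    | nil => simp [PySem.Chars.count.go]
    | cons x t => simp at h
  | succ fuel ih =>
    cases l with
    | nil => simp [PySem.Chars.count.go]
    | cons x t =>
      simp only [List.length_cons, Nat.succ_le_succ_iff] at h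
      by_cases hc : c = x
      · subst hc
        simp [PySem.Chars.count.go, List.isPrefixOf, ih t _ h]
        omega
      · have hpre : ([c].isPrefixOf (x :: t)) = false := by
          simp [List.isPrefixOf, hc]
        simp only [PySem.Chars.count.go, hpre, Bool.false_eq_true, if_false, ih t _ h,
          List.count_cons]
        have : (x == c) = false := by simp; exact fun e => hc e.symm
        simp [this]

theorem chars_count_single (l : List Char) (c : Char) :
    PySem.Chars.count l [c] = l.count c := by
  simp [PySem.Chars.count, count_go_single c l.length l 0 le_rfl]

-- Sum of the four base counts = number of positions holding a base.
theorem count_four_eq_countP (l : List Char) :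
    l.count 'A' + l.count 'T' + l.count 'C' + l.count 'G'
      = l.countP (fun bp => (['A', 'T', 'C', 'G'] : List Char).contains bp) := by
  induction l with
  | nil => simp
  | cons x t ih =>
    simp only [List.count_cons, List.countP_cons]
    by_cases hA : x = 'A' <;> by_cases hT : x = 'T' <;> by_cases hC : x = 'C' <;>
      by_cases hG : x = 'G' <;>
      simp_all <;> omega

-- ===== VERDICT (by name: the statement is the Claim_ definition above) =====
theorem is_DNA_seq_spec : Claim_equal_is_DNA_seq := by
  intro seq _
  unfold Spec_is_DNA_seq is_DNA_seq is_DNA_seq_alt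
  rw [Bool.eq_iff_iff]
  rw [foldl_append_all]
  have hA : ("A".toList) = ['A'] := rfl
  have hT : ("T".toList) = ['T'] := rfl
  have hC : ("C".toList) = ['C'] := rfl
  have hG : ("G".toList) = ['G'] := rfl
  simp only [List.all_nil, Bool.true_and, PySem.Str.len_eq, PySem.Str.count_eq,
    hA, hT, hC, hG, chars_count_single, beq_iff_eq]
  have hsum := count_four_eq_countP seq.toList
  have hle := List.countP_eq_length
    (p := fun bp => (['A', 'T', 'C', 'G'] : List Char).contains bp) (l := seq.toList)
  constructor
  · intro h
    have : seq.toList.countP (fun bp => (['A', 'T', 'C', 'G'] : List Char).contains bp)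
        = seq.toList.length := hle.mpr (List.all_eq_true.mp h)
    omega
  · intro h
    apply List.all_eq_true.mpr
    apply hle.mp
    push_cast at h
    omega
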